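-- pv_equiv track=rewrite | github.com/Zoxel06/AlejandroCano-PRO | Curso 2/Acceso a Datos/Python/ControladorAereo/Prueba3.py | actualizar_flujos
-- ===== SOURCE A (Python) =====
-- from typing import Dict, List, Optional, Tuple
--
-- def actualizar_flujos(vuelos: Dict[str, Dict]) -> Tuple[List[str], List[str]]:
--     aterrizaje = []
--     despegue = []
--     for idv, v in vuelos.items():
--         if v["estado"] != "EN_COLA":
--             continue
--         if v["tipo"] == "ATERRIZAJE":
--             aterrizaje.append(idv)
--         else:
--             despegue.append(idv)
--     return aterrizaje, despegue
-- ===== SOURCE B (Python) =====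
-- from typing import Dict, List, Tuple
--
--
-- def _queued_ids(vuelos: Dict[str, Dict], landing: bool) -> List[str]:
--     return [idv for idv, v in vuelos.items()
--             if v["estado"] == "EN_COLA" and (v["tipo"] == "ATERRIZAJE") == landing]
--
--
-- def actualizar_flujos(vuelos: Dict[str, Dict]) -> Tuple[List[str], List[str]]:
--     return _queued_ids(vuelos, True), _queued_ids(vuelos, False)
-- ===== Notes on version B (the rewrite author's own statement) =====
-- stated objective: simpler
-- what changed: Replaces the single stateful partitioning loop with two independent filtering passes via one shared comprehension helper parameterised by the flight kind.
import Mathlib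
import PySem

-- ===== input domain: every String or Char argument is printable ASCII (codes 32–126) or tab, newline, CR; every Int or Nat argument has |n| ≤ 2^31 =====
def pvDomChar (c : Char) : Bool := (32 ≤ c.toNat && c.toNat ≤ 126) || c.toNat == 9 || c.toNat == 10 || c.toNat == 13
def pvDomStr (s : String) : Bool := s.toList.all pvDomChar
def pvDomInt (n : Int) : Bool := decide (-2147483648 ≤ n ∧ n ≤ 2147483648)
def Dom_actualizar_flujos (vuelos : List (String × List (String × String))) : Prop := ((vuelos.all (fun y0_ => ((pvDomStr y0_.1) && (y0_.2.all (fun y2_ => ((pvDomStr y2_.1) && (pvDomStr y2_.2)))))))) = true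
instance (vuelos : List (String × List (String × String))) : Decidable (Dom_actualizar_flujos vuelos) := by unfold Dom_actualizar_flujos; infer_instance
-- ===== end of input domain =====

-- B replaces A's single stateful partitioning loop with two independent filtering passes
-- through a shared helper (objective: simpler); same O(n) cost, return value only.

-- Python dict lookup v[k] (keys unique in a Python dict, so first match is exact);
-- none = KeyError, excluded by Pre_.
def pvGetS (v : List (String × String)) (k : String) : Option String := List.lookup k v

-- ===== PORT A =====
def actualizar_flujos (vuelos : List (String × List (String × String))) : List String × List String :=
  vuelos.foldl
    (fun st p =>
      match pvGetS p.2 "estado" with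
      | none => st            -- KeyError in Python: excluded by Pre_
      | some e =>
        if e ≠ "EN_COLA" then st   -- continue
        else
          match pvGetS p.2 "tipo" with
          | none => st        -- KeyError in Python: excluded by Pre_
          | some t =>
            if t = "ATERRIZAJE" then (st.1 ++ [p.1], st.2)
            else (st.1, st.2 ++ [p.1]))
    ([], [])

-- ===== PORT B =====
-- _queued_ids(vuelos, landing): one comprehension, filtering on the flight kind flag
def pvQueuedIds (vuelos : List (String × List (String × String))) (landing : Bool) : List String :=
  vuelos.filterMap
    (fun p =>
      match pvGetS p.2 "estado" with
      | none => none          -- KeyError in Python: excluded by Pre_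
      | some e =>
        if e = "EN_COLA" then
          match pvGetS p.2 "tipo" with
          | none => none      -- KeyError in Python: excluded by Pre_
          | some t => if (decide (t = "ATERRIZAJE")) = landing then some p.1 else none
        else none)

def actualizar_flujos_alt (vuelos : List (String × List (String × String))) : List String × List String :=
  (pvQueuedIds vuelos true, pvQueuedIds vuelos false)

-- ===== PRECONDITION & SPEC =====
-- A raises KeyError when a flight record lacks "estado", or is EN_COLA and lacks "tipo"; exactly those inputs are excluded.
def Pre_actualizar_flujos (vuelos : List (String × List (String × String))) : Prop :=
  ∀ p ∈ vuelos, (pvGetS p.2 "estado").isSome ∧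
    (pvGetS p.2 "estado" = some "EN_COLA" → (pvGetS p.2 "tipo").isSome)
instance (vuelos : List (String × List (String × String))) : Decidable (Pre_actualizar_flujos vuelos) := by unfold Pre_actualizar_flujos; infer_instance

def pvWitness_actualizar_flujos : (List (String × List (String × String))) :=
  [("V1", [("estado", "EN_COLA"), ("tipo", "ATERRIZAJE")]),
   ("V2", [("estado", "EN_COLA"), ("tipo", "DESPEGUE")]),
   ("V3", [("estado", "VOLANDO")])]

def Spec_actualizar_flujos (vuelos : List (String × List (String × String))) (out : List String × List String) : Prop := out = actualizar_flujos_alt vuelos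
instance (vuelos : List (String × List (String × String))) (out : List String × List String) : Decidable (Spec_actualizar_flujos vuelos out) := by unfold Spec_actualizar_flujos; infer_instance

-- ===== CLAIM (what is proved, stated in full; the proofs are below) =====
def Claim_equal_actualizar_flujos : Prop := ∀ (vuelos : List (String × List (String × String))), Dom_actualizar_flujos vuelos → Pre_actualizar_flujos vuelos → Spec_actualizar_flujos vuelos (actualizar_flujos vuelos)

-- ===== LEMMAS AND PROOFS =====
theorem actualizar_flujos_foldl_key
    (l : List (String × List (String × String)))
    (h : ∀ p ∈ l, (pvGetS p.2 "estado").isSome ∧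
        (pvGetS p.2 "estado" = some "EN_COLA" → (pvGetS p.2 "tipo").isSome))
    (a d : List String) :
    l.foldl
      (fun st p =>
        match pvGetS p.2 "estado" with
        | none => st
        | some e =>
          if e ≠ "EN_COLA" then st
          else
            match pvGetS p.2 "tipo" with
            | none => st
            | some t =>
              if t = "ATERRIZAJE" then (st.1 ++ [p.1], st.2)
              else (st.1, st.2 ++ [p.1]))
      (a, d)
    = (a ++ pvQueuedIds l true, d ++ pvQueuedIds l false) := by
  induction l generalizing a d with
  | nil => simp [pvQueuedIds]
  | cons p l ih =>
    have hp := h p (List.mem_cons_self ..)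
    have hl : ∀ q ∈ l, (pvGetS q.2 "estado").isSome ∧
        (pvGetS q.2 "estado" = some "EN_COLA" → (pvGetS q.2 "tipo").isSome) := by
      intro q hq; exact h q (List.mem_cons_of_mem _ hq)
    obtain ⟨h1, h2⟩ := hp
    cases he : pvGetS p.2 "estado" with
    | none => simp [he] at h1
    | some e =>
      by_cases hec : e = "EN_COLA"
      · subst hec
        cases ht : pvGetS p.2 "tipo" with
        | none => rw [he] at h2; simp [ht] at h2
        | some t =>
          by_cases hta : t = "ATERRIZAJE"
          · subst hta
            have hstep : List.foldl
                (fun (st : List String × List String) p =>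
                  match pvGetS p.2 "estado" with
                  | none => st
                  | some e =>
                    if e ≠ "EN_COLA" then st
                    else
                      match pvGetS p.2 "tipo" with
                      | none => st
                      | some t =>
                        if t = "ATERRIZAJE" then (st.1 ++ [p.1], st.2)
                        else (st.1, st.2 ++ [p.1]))
                (a, d) (p :: l)
                = List.foldl
                (fun (st : List String × List String) p =>
                  match pvGetS p.2 "estado" with
                  | none => st
                  | some e =>
                    if e ≠ "EN_COLA" then st
                    else
                      match pvGetS p.2 "tipo" with
                      | none => st
                      | some t =>
                        if t = "ATERRIZAJE" then (st.1 ++ [p.1], st.2)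
                        else (st.1, st.2 ++ [p.1]))
                (a ++ [p.1], d) l := by
              rw [List.foldl_cons]; congr 1; simp [he, ht]
            have hqt : pvQueuedIds (p :: l) true = p.1 :: pvQueuedIds l true := by
              simp [pvQueuedIds, he, ht]
            have hqf : pvQueuedIds (p :: l) false = pvQueuedIds l false := by
              simp [pvQueuedIds, he, ht]
            rw [hstep, ih hl, hqt, hqf]
            simp
          · have hstep : List.foldl
                (fun (st : List String × List String) p =>
                  match pvGetS p.2 "estado" with
                  | none => st
                  | some e =>
                    if e ≠ "EN_COLA" then st
                    else
                      match pvGetS p.2 "tipo" with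
                      | none => st
                      | some t =>
                        if t = "ATERRIZAJE" then (st.1 ++ [p.1], st.2)
                        else (st.1, st.2 ++ [p.1]))
                (a, d) (p :: l)
                = List.foldl
                (fun (st : List String × List String) p =>
                  match pvGetS p.2 "estado" with
                  | none => st
                  | some e =>
                    if e ≠ "EN_COLA" then st
                    else
                      match pvGetS p.2 "tipo" with
                      | none => st
                      | some t =>
                        if t = "ATERRIZAJE" then (st.1 ++ [p.1], st.2)
                        else (st.1, st.2 ++ [p.1]))
                (a, d ++ [p.1]) l := by
              rw [List.foldl_cons]; congr 1; simp [he, ht, hta]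
            have hqt : pvQueuedIds (p :: l) true = pvQueuedIds l true := by
              simp [pvQueuedIds, he, ht, hta]
            have hqf : pvQueuedIds (p :: l) false = p.1 :: pvQueuedIds l false := by
              simp [pvQueuedIds, he, ht, hta]
            rw [hstep, ih hl, hqt, hqf]
            simp
      · have hstep : List.foldl
            (fun (st : List String × List String) p =>
              match pvGetS p.2 "estado" with
              | none => st
              | some e =>
                if e ≠ "EN_COLA" then st
                else
                  match pvGetS p.2 "tipo" with
                  | none => st
                  | some t =>
                    if t = "ATERRIZAJE" then (st.1 ++ [p.1], st.2)
                    else (st.1, st.2 ++ [p.1]))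
            (a, d) (p :: l)
            = List.foldl
            (fun (st : List String × List String) p =>
              match pvGetS p.2 "estado" with
              | none => st
              | some e =>
                if e ≠ "EN_COLA" then st
                else
                  match pvGetS p.2 "tipo" with
                  | none => st
                  | some t =>
                    if t = "ATERRIZAJE" then (st.1 ++ [p.1], st.2)
                    else (st.1, st.2 ++ [p.1]))
            (a, d) l := by
          rw [List.foldl_cons]; congr 1; simp [he, hec]
        have hqt : pvQueuedIds (p :: l) true = pvQueuedIds l true := by
          simp [pvQueuedIds, he, hec]
        have hqf : pvQueuedIds (p :: l) false = pvQueuedIds l false := by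
          simp [pvQueuedIds, he, hec]
        rw [hstep, ih hl, hqt, hqf]

-- ===== VERDICT (by name: the statement is the Claim_ definition above) =====
theorem actualizar_flujos_spec : Claim_equal_actualizar_flujos := by
  intro vuelos _ hpre
  show actualizar_flujos vuelos = actualizar_flujos_alt vuelos
  unfold actualizar_flujos actualizar_flujos_alt
  rw [actualizar_flujos_foldl_key vuelos hpre [] []]
  simp
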